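-- pv_equiv track=rewrite | github.com/Jayjunyoung/JS_Python_Algorithm | programmers/greedy/Python/조이스틱.py | solution
-- ===== SOURCE A (Python) =====
-- def solution(name):
--     # 알파벳 변경 횟수( 상하 이동 )
--     # name의 글자 수에 따라 A의 숫자 결정
--     spell_move = 0
--
--     # 커서 이동 횟수, 이름의 길이 - 1( 좌우 이동 )
--     cursor_move = len(name) - 1
--
--     for i, spell in enumerate(name) :
--         # 알파벳 변경 횟수, 위 아래 최솟 값 구하기
--         spell_move += min(ord(spell) - ord('A'), ord('Z')- ord(spell) + 1)
--
--          # 해당 알파벳 다음부터 연속된 A 문자열 찾기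
--         next = i + 1 # 두 번째 알파벳 부터 시작
--         while next < len(name) and name[next] == 'A' :
--             next += 1
--
--         cursor_move = min(cursor_move, 2 * i + len(name) - next,  i + 2 * (len(name) - next) )
--
--     return spell_move + cursor_move
-- ===== SOURCE B (Python) =====
-- def solution(name):
--     n = len(name)
--     # nxt[i] = smallest j >= i with name[j] != 'A', or n if none: one reverse pass
--     nxt = [n] * (n + 1)
--     for i in range(n - 1, -1, -1):
--         nxt[i] = nxt[i + 1] if name[i] == 'A' else i
--     spell = sum(min(ord(c) - ord('A'), ord('Z') - ord(c) + 1) for c in name)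
--     cursor = n - 1
--     for i in range(n):
--         nx = nxt[i + 1]
--         cursor = min(cursor, 2 * i + n - nx, i + 2 * (n - nx))
--     return spell + cursor
-- ===== Notes on version B (the rewrite author's own statement) =====
-- stated objective: alternative
-- what changed: Replaced A's per-index inner while-scan over the following run of 'A's by a next-non-'A' index table built in one reverse pass, and split A's fused loop into a spell-cost sum plus a cursor-cost loop (worst-case O(n) instead of O(n^2), though not measurably faster on random inputs).
import Mathlib
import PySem

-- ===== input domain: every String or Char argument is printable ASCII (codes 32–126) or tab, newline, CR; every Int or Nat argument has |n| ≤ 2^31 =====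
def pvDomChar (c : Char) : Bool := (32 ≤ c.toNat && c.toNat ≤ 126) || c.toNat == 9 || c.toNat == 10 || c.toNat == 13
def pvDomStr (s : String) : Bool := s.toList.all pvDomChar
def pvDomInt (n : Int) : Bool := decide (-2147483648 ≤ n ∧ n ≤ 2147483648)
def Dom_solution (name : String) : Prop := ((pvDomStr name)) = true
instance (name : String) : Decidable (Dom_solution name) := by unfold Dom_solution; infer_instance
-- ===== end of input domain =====

-- B replaces A's per-index inner while-scan for the next non-'A' character by a
-- next-non-'A' table built in one reverse pass, and splits the fused loop; return values agree.

-- ===== PORT A =====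
-- inner 'while next < len(name) and name[next] == 'A': next += 1'
def aWhile (s : List Char) (next : Nat) : Nat :=
  if h : next < s.length ∧ s.getD next ' ' = 'A' then aWhile s (next + 1) else next
termination_by s.length - next
decreasing_by omega

def solution (name : String) : Int :=
  let s := name.toList
  let res := (PySem.List.enumerate s 0).foldl
    (fun (st : Int × Int) (p : Int × Char) =>
      (st.1 + min ((p.2.toNat : Int) - 65) (90 - (p.2.toNat : Int) + 1),
       min (min st.2
              (2 * p.1 + (s.length : Int) - (aWhile s (p.1.toNat + 1) : Int)))
           (p.1 + 2 * ((s.length : Int) - (aWhile s (p.1.toNat + 1) : Int)))))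
    (0, (s.length : Int) - 1)
  res.1 + res.2

-- ===== PORT B =====
-- nxt[i] = first index ≥ i holding a non-'A' char, or n; built back-to-front (B's reverse loop)
def buildNxt : List Char → Nat → List Nat
  | [], i => [i]
  | c :: r, i =>
      let t := buildNxt r (i + 1)
      (if c = 'A' then t.headD (i + 1) else i) :: t

def solution_alt (name : String) : Int :=
  let s := name.toList
  let n := s.length
  let nxt := buildNxt s 0
  let spell := s.foldl (fun acc c => acc + min ((c.toNat : Int) - 65) (90 - (c.toNat : Int) + 1)) 0
  let cursor := (List.range n).foldl
    (fun cm i =>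
      let nx := nxt.getD (i + 1) 0
      min (min cm (2 * (i : Int) + (n : Int) - (nx : Int)))
          ((i : Int) + 2 * ((n : Int) - (nx : Int)))) ((n : Int) - 1)
  spell + cursor

-- ===== PRECONDITION & SPEC =====
def Spec_solution (name : String) (out : Int) : Prop := out = solution_alt name
instance (name : String) (out : Int) : Decidable (Spec_solution name out) := by unfold Spec_solution; infer_instance

-- ===== CLAIM (what is proved, stated in full; the proofs are below) =====
def Claim_equal_solution : Prop := ∀ (name : String), Dom_solution name → Spec_solution name (solution name)

-- ===== LEMMAS AND PROOFS =====

-- number of leading 'A's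
def leadA : List Char → Nat
  | [] => 0
  | c :: r => if c = 'A' then leadA r + 1 else 0

theorem aWhile_eq (s : List Char) (k : Nat) (hk : k ≤ s.length) :
    aWhile s k = k + leadA (s.drop k) := by
  rw [aWhile]
  split
  · rename_i h
    rw [aWhile_eq s (k + 1) (by omega)]
    rw [List.drop_eq_getElem_cons h.1]
    have hA : s[k] = 'A' := by
      have := h.2
      rwa [List.getD_eq_getElem s ' ' h.1] at this
    simp [leadA, hA]
    omega
  · rename_i h
    rcases Nat.lt_or_ge k s.length with hlt | hge
    · have hne : s.getD k ' ' ≠ 'A' := fun hc => h ⟨hlt, hc⟩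
      rw [List.drop_eq_getElem_cons hlt]
      have : s[k] ≠ 'A' := by rwa [List.getD_eq_getElem s ' ' hlt] at hne
      simp [leadA, this]
    · have : s.length = k := by omega
      rw [List.drop_eq_nil_of_le (by omega)]
      simp [leadA]
termination_by s.length - k

theorem buildNxt_headD (s : List Char) (i d : Nat) :
    (buildNxt s i).headD d = (buildNxt s i).getD 0 0 := by
  cases s <;> simp [buildNxt]

theorem buildNxt_getD (s : List Char) (i j : Nat) (hj : j ≤ s.length) :
    (buildNxt s i).getD j 0 = i + j + leadA (s.drop j) := by
  induction s generalizing i j with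
  | nil =>
      have hj0 : j = 0 := by simpa using hj
      subst hj0
      simp [buildNxt, leadA]
  | cons c r ih =>
      cases j with
      | zero =>
          simp only [buildNxt, List.getD_cons_zero]
          by_cases hc : c = 'A'
          · rw [if_pos hc, buildNxt_headD, ih (i + 1) 0 (by omega)]
            simp [leadA, hc]; omega
          · rw [if_neg hc]
            simp [leadA, hc]
      | succ j' =>
          simp only [buildNxt, List.getD_cons_succ, List.drop_succ_cons]
          rw [ih (i + 1) j' (by simpa using hj)]
          omega

theorem foldl_pair_split {α : Type} (f : Int → α → Int) (g : Int → α → Int)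
    (l : List α) (a b : Int) :
    l.foldl (fun st x => (f st.1 x, g st.2 x)) (a, b) = (l.foldl f a, l.foldl g b) := by
  induction l generalizing a b with
  | nil => rfl
  | cons x xs ih => simp [List.foldl_cons, ih]

-- ===== VERDICT (by name: the statement is the Claim_ definition above) =====
theorem solution_spec : Claim_equal_solution := by
  intro name _
  unfold Spec_solution solution solution_alt
  simp only []
  set s := name.toList with hs
  set n := s.length with hn
  rw [PySem.List.enumerate_eq_map_pyRange s ' ', List.foldl_map]
  dsimp only
  rw [foldl_pair_split
    (fun a (y : Int) => a + min (((PySem.List.pyGetD s y ' ').toNat : Int) - 65)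
        (90 - ((PySem.List.pyGetD s y ' ').toNat : Int) + 1))
    (fun cm (y : Int) =>
      min (min cm (2 * y + (n : Int) - (aWhile s (y.toNat + 1) : Int)))
          (y + 2 * ((n : Int) - (aWhile s (y.toNat + 1) : Int))))]
  dsimp only
  congr 1
  · exact PySem.List.foldl_pyRange_zero_pyGetD s ' '
      (fun a c => a + min ((c.toNat : Int) - 65) (90 - (c.toNat : Int) + 1)) 0
  · rw [show PySem.List.len s = ((n : Nat) : Int) from by simp [hn]]
    rw [PySem.List.pyRange_zero_natCast, List.foldl_map]
    apply PySem.List.foldl_congr_mem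
    intro acc i hi
    have hin : i < n := List.mem_range.mp hi
    have h1 : ((i : Int)).toNat = i := by omega
    rw [h1]
    rw [aWhile_eq s (i + 1) (by omega), buildNxt_getD s 0 (i + 1) (by omega)]
    simp
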